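-- pv_equiv track=rewrite | github.com/tettta/tensaku | src/tensaku/experiments/preflight.py | _finalize_label_stats
-- ===== SOURCE A (Python) =====
-- from typing import Any, Dict, Iterable, List, Mapping, Optional, Tuple
--
-- def _finalize_label_stats(labels: List[int]) -> Tuple[Optional[int], Optional[int], Optional[int], int, Optional[bool], List[int]]:
--     if not labels:
--         return None, None, None, 0, None, []
--     u = sorted(set(labels))
--     mn = u[0]
--     mx = u[-1]
--     num = mx + 1  # 0..max を想定（欠番は missing_labels に出す）
--     missing = [k for k in range(mn, mx + 1) if k not in set(u)]
--     is_cont = len(missing) == 0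
--     return mn, mx, num, len(u), is_cont, missing
-- ===== SOURCE B (Python) =====
-- def _finalize_label_stats(labels):
--     if not labels:
--         return None, None, None, 0, None, []
--     u = sorted(set(labels))
--     mn = u[0]
--     mx = u[-1]
--     missing = []
--     expected = mn
--     for k in u:
--         missing.extend(range(expected, k))
--         expected = k + 1
--     return mn, mx, mx + 1, len(u), len(missing) == 0, missing
-- ===== Notes on version B (the rewrite author's own statement) =====
-- stated objective: faster
-- what changed: missing labels are produced by one ascending gap-fill pass over the sorted uniques (extend with range(expected,k)) instead of scanning every integer in [mn,mx] with a set membership test that rebuilds set(u) per element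
import Mathlib
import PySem

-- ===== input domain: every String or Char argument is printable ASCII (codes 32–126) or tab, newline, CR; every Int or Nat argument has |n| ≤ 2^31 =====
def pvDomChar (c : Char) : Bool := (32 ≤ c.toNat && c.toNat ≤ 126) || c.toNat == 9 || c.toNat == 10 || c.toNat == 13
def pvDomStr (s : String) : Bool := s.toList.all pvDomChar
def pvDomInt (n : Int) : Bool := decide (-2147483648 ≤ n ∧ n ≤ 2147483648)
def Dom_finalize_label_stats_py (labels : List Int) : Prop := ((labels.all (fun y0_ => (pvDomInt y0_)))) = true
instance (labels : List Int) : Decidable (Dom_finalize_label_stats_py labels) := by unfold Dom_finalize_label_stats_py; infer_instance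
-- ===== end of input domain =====

-- B replaces A's per-element membership scan of range(mn, mx+1) (which rebuilds set(u)
-- for every candidate) by a single ascending gap-fill pass over the sorted uniques.

-- ===== PORT A =====
def finalize_label_stats_py (labels : List Int) : Option Int × Option Int × Option Int × Int × Option Bool × List Int :=
  if labels = [] then (none, none, none, 0, none, [])
  else
    let u := PySem.List.sorted (PySem.Set.ofList labels) (fun x => x) false
    -- u ≠ [] on this branch, so u[0] and u[-1] never raise; .getD 0 is unreachable
    let mn := (PySem.List.pyGet? u 0).getD 0
    let mx := (PySem.List.pyGet? u (-1)).getD 0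
    let num := mx + 1
    let missing := (PySem.List.pyRange mn (mx + 1) 1).filter (fun k => decide (k ∉ PySem.Set.ofList u))
    let is_cont := decide (missing.length = 0)
    (some mn, some mx, some num, (u.length : Int), some is_cont, missing)

-- ===== PORT B =====
-- the gap-fill loop: for k in u: missing.extend(range(expected, k)); expected = k + 1
def pvGapFill (expected : Int) (u : List Int) : List Int :=
  match u with
  | [] => []
  | k :: t => PySem.List.pyRange expected k 1 ++ pvGapFill (k + 1) t

def finalize_label_stats_py_alt (labels : List Int) : Option Int × Option Int × Option Int × Int × Option Bool × List Int :=
  if labels = [] then (none, none, none, 0, none, [])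
  else
    let u := PySem.List.sorted (PySem.Set.ofList labels) (fun x => x) false
    let mn := (PySem.List.pyGet? u 0).getD 0
    let mx := (PySem.List.pyGet? u (-1)).getD 0
    let missing := pvGapFill mn u
    (some mn, some mx, some (mx + 1), (u.length : Int), some (decide (missing.length = 0)), missing)

-- ===== PRECONDITION & SPEC =====
def Spec_finalize_label_stats_py (labels : List Int) (out : Option Int × Option Int × Option Int × Int × Option Bool × List Int) : Prop := out = finalize_label_stats_py_alt labels
instance (labels : List Int) (out : Option Int × Option Int × Option Int × Int × Option Bool × List Int) : Decidable (Spec_finalize_label_stats_py labels out) := by unfold Spec_finalize_label_stats_py; infer_instance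

-- ===== CLAIM (what is proved, stated in full; the proofs are below) =====
def Claim_equal_finalize_label_stats_py : Prop := ∀ (labels : List Int), Dom_finalize_label_stats_py labels → Spec_finalize_label_stats_py labels (finalize_label_stats_py labels)

-- ===== LEMMAS AND PROOFS =====

-- core: on a strictly increasing list u = k :: t with lo ≤ k, the range scan from lo to
-- (last u) + 1 keeping non-members equals the gap-fill pass starting at lo
theorem pv_filter_eq_gapFill (u : List Int) (lo : Int)
    (hp : u.Pairwise (· < ·)) (hlo : ∀ x ∈ u, lo ≤ x) (hne : u ≠ []) :
    (PySem.List.pyRange lo (u.getLastD 0 + 1) 1).filter (fun k => decide (k ∉ u)) = pvGapFill lo u := by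
  induction u generalizing lo with
  | nil => exact absurd rfl hne
  | cons k t ih =>
    have hk : lo ≤ k := hlo k (by simp)
    have ht : ∀ x ∈ t, k < x := by
      intro x hx; exact (List.pairwise_cons.mp hp).1 x hx
    have hp' : t.Pairwise (· < ·) := (List.pairwise_cons.mp hp).2
    have hlast : k ≤ (k :: t).getLastD 0 := by
      cases t with
      | nil => simp
      | cons j s =>
        have he : (k :: j :: s).getLastD 0 = (j :: s).getLastD 0 := by simp
        rw [he]
        have hmem : (j :: s).getLastD 0 ∈ j :: s := by
          rw [List.getLastD_cons]; exact List.getLastD_mem_cons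
        exact le_of_lt (ht _ hmem)
    rw [PySem.List.pyRange_one_append lo k ((k :: t).getLastD 0 + 1) hk (by omega)]
    rw [List.filter_append]
    have h1 : (PySem.List.pyRange lo k 1).filter (fun x => decide (x ∉ k :: t)) = PySem.List.pyRange lo k 1 := by
      apply List.filter_eq_self.mpr
      intro x hx
      have hxk : x < k := (PySem.List.mem_pyRange_one.mp hx).2
      simp only [decide_eq_true_eq, List.mem_cons]
      rintro (h1 | h2)
      · omega
      · exact absurd (ht x h2) (by omega)
    rw [h1]
    rw [PySem.List.pyRange_one_cons (a := k) (b := (k :: t).getLastD 0 + 1) (by omega)]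
    simp only [List.filter_cons]
    have hk_mem : (decide (k ∉ k :: t)) = false := by simp
    rw [hk_mem]
    cases t with
    | nil =>
      simp only [pvGapFill]
      have : (k :: ([] : List Int)).getLastD 0 = k := by simp
      rw [this, PySem.List.pyRange_one_eq_nil (a := k + 1) (b := k + 1) le_rfl]
      simp
    | cons j s =>
      have hlast2 : (k :: j :: s).getLastD 0 = (j :: s).getLastD 0 := by simp
      have hfe : (PySem.List.pyRange (k + 1) ((k :: j :: s).getLastD 0 + 1) 1).filter (fun x => decide (x ∉ k :: j :: s))
          = (PySem.List.pyRange (k + 1) ((j :: s).getLastD 0 + 1) 1).filter (fun x => decide (x ∉ j :: s)) := by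
        rw [hlast2]
        apply List.filter_congr
        intro x hx
        have : k < x := by have := (PySem.List.mem_pyRange_one.mp hx).1; omega
        simp only [decide_eq_decide, List.mem_cons]
        constructor
        · intro h hx2; exact h (Or.inr hx2)
        · intro h hx2
          rcases hx2 with h1 | h2
          · omega
          · exact h h2
      rw [hfe, ih (k + 1) hp' (fun x hx => by have := ht x hx; omega) (by simp)]
      simp [pvGapFill]

theorem pv_sorted_ne_nil (labels : List Int) (h : labels ≠ []) :
    PySem.List.sorted (PySem.Set.ofList labels) (fun x => x) false ≠ [] := by
  intro hc
  rw [PySem.List.sorted_eq_nil_iff] at hc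
  cases labels with
  | nil => exact h rfl
  | cons a t =>
    have : a ∈ PySem.Set.ofList (a :: t) := (PySem.Set.mem_ofList _ _).mpr (by simp)
    rw [hc] at this; exact absurd this (by simp)

-- ===== VERDICT (by name: the statement is the Claim_ definition above) =====
theorem finalize_label_stats_py_spec : Claim_equal_finalize_label_stats_py := by
  unfold Claim_equal_finalize_label_stats_py Spec_finalize_label_stats_py
  intro labels _
  unfold finalize_label_stats_py finalize_label_stats_py_alt
  by_cases h : labels = []
  · simp [h]
  · simp only [if_neg h]
    set u := PySem.List.sorted (PySem.Set.ofList labels) (fun x => x) false with hu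
    have hune : u ≠ [] := pv_sorted_ne_nil labels h
    have hpw : u.Pairwise (· < ·) := hu ▸ PySem.List.sorted_ofList_pairwise_lt labels
    obtain ⟨m, t, hmt⟩ := List.exists_cons_of_ne_nil hune
    have hmn : (PySem.List.pyGet? u 0).getD 0 = m := by rw [hmt]; simp
    have hmx : (PySem.List.pyGet? u (-1)).getD 0 = u.getLastD 0 := by
      rw [PySem.List.pyGet?_neg_one, hmt]
      simp [List.getLastD_eq_getLast?]
    have hfilt : (PySem.List.pyRange ((PySem.List.pyGet? u 0).getD 0) ((PySem.List.pyGet? u (-1)).getD 0 + 1) 1).filter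
        (fun k => decide (k ∉ PySem.Set.ofList u)) = pvGapFill ((PySem.List.pyGet? u 0).getD 0) u := by
      rw [hmn, hmx]
      have hmem : ∀ x : Int, x ∈ PySem.Set.ofList u ↔ x ∈ u := fun x => PySem.Set.mem_ofList _ _
      have hcongr : (PySem.List.pyRange m (u.getLastD 0 + 1) 1).filter (fun k => decide (k ∉ PySem.Set.ofList u))
          = (PySem.List.pyRange m (u.getLastD 0 + 1) 1).filter (fun k => decide (k ∉ u)) := by
        apply List.filter_congr
        intro x _
        simp [hmem]
      rw [hcongr]
      apply pv_filter_eq_gapFill u m hpw _ hune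
      · intro x hx
        rw [hmt] at hx
        rcases List.mem_cons.mp hx with h1 | h2
        · omega
        · exact le_of_lt ((List.pairwise_cons.mp (hmt ▸ hpw)).1 x h2)
    simp only [hfilt]
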